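-- pv_equiv track=rewrite | github.com/dungdm93/code-gym | hackerrank/pothole.py | do_logic
-- ===== SOURCE A (Python) =====
-- def do_logic(heights):
--     diff = []
--     for i in range(1, len(heights)):
--         diff.append(heights[i] - heights[i - 1])
--     up = down = max_depth = 0
--     for i, d in enumerate(diff):
--         if d == 0:
--             up = down = 0
--         elif d < 0:
--             up = 0
--             if i > 0 and diff[i - 1] >= 0:
--                 down = 0
--             down = down + d
--         elif d > 0:
--             up = up + d
--             curr_dep = min(abs(up), abs(down))
--             max_depth = max(max_depth, curr_dep)
--     return max_depth
-- ===== SOURCE B (Python) =====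
-- def do_logic(heights):
--     diffs = [b - a for a, b in zip(heights, heights[1:])]
--     runs = []
--     for d in diffs:
--         if d == 0:
--             runs.append(None)
--         elif runs and runs[-1] is not None and (runs[-1] < 0) == (d < 0):
--             runs[-1] += d
--         else:
--             runs.append(d)
--     best = 0
--     for prev, cur in zip(runs, runs[1:]):
--         if prev is not None and cur is not None and prev < 0 and cur > 0:
--             best = max(best, min(-prev, cur))
--     return best
-- ===== Notes on version B (the rewrite author's own statement) =====
-- stated objective: alternative
-- what changed: Replaces A's single rolling state machine (up/down accumulators with an index-based lookback reset) by a two-phase traversal: first collapse consecutive same-sign differences into a run list with explicit zero-boundary markers, then scan adjacent run pairs (negative followed by positive) taking max of min(-neg, pos).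
import Mathlib
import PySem

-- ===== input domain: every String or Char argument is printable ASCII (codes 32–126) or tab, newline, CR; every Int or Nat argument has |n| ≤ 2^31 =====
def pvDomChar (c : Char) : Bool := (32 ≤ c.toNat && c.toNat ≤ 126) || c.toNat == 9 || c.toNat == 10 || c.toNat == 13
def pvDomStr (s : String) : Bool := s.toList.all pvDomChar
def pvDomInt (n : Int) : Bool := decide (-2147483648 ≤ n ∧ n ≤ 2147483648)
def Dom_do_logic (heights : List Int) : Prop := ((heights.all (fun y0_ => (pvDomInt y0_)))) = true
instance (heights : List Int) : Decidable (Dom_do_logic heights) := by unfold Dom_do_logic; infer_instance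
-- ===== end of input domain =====

-- B re-organises A's rolling up/down state machine into a build-runs-then-pair-adjacent-runs
-- two-phase traversal (objective: alternative, same O(n) cost apart from B's list appends).

-- ===== PORT A =====
-- loop body of A's second loop ('for i, d in enumerate(diff)'); state = (up, down, max_depth)
def stepA (diff : List Int) (s : Int × Int × Int) (p : Int × Int) : Int × Int × Int :=
  let up := s.1; let down := s.2.1; let md := s.2.2
  let i := p.1; let d := p.2
  if d = 0 then (0, 0, md)
  else if d < 0 then
    let down := if 0 < i ∧ 0 ≤ PySem.List.pyGetD diff (i - 1) 0 then 0 else down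
    (0, down + d, md)
  else
    let up := up + d
    (up, down, max md (min |up| |down|))

def do_logic (heights : List Int) : Int :=
  let diff := (PySem.List.pyRange 1 (heights.length : Int) 1).foldl
    (fun acc i => acc ++ [PySem.List.pyGetD heights i 0 - PySem.List.pyGetD heights (i - 1) 0]) []
  ((PySem.List.enumerate diff 0).foldl (stepA diff) (0, 0, 0)).2.2

-- ===== PORT B =====
-- run-building loop body of Source B: zero diff → boundary marker (none); same sign as last run → merge; else new run
def stepB (runs : List (Option Int)) (d : Int) : List (Option Int) :=
  if d = 0 then runs ++ [none]
  else
    match runs.getLast? with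
    | some (some x) => if (decide (x < 0)) = (decide (d < 0)) then runs.dropLast ++ [some (x + d)] else runs ++ [some d]
    | _ => runs ++ [some d]

-- pairing loop body of Source B: a negative run immediately followed by a positive run contributes min(-neg, pos)
def pairStepB (best : Int) (p : Option Int × Option Int) : Int :=
  match p with
  | (some a, some b) => if a < 0 ∧ 0 < b then max best (min (-a) b) else best
  | _ => best

def do_logic_alt (heights : List Int) : Int :=
  let diffs := (heights.zip (PySem.List.slice heights (some 1) none)).map (fun p => p.2 - p.1)
  let runs := diffs.foldl stepB []
  (runs.zip (PySem.List.slice runs (some 1) none)).foldl pairStepB 0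

-- ===== PRECONDITION & SPEC =====
def Spec_do_logic (heights : List Int) (out : Int) : Prop := out = do_logic_alt heights
instance (heights : List Int) (out : Int) : Decidable (Spec_do_logic heights out) := by unfold Spec_do_logic; infer_instance

-- ===== CLAIM (what is proved, stated in full; the proofs are below) =====
def Claim_equal_do_logic : Prop := ∀ (heights : List Int), Dom_do_logic heights → Spec_do_logic heights (do_logic heights)

-- ===== LEMMAS AND PROOFS =====

-- A's machine, recast as structural recursion carrying the previous diff (none = first iteration)
def goA : Option Int → List Int → Int → Int → Int → Int
  | _, [], _, _, md => md
  | prev, d :: rest, up, down, md =>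
    if d = 0 then goA (some d) rest 0 0 md
    else if d < 0 then
      goA (some d) rest 0 ((if (match prev with | some p => decide (0 ≤ p) | none => false) then 0 else down) + d) md
    else
      goA (some d) rest (up + d) down (max md (min |up + d| |down|))

-- B's run building, recast with the run list REVERSED (newest run at the head)
def stepRev (r : List (Option Int)) (d : Int) : List (Option Int) :=
  if d = 0 then none :: r
  else
    match r with
    | some x :: t => if (decide (x < 0)) = (decide (d < 0)) then some (x + d) :: t else some d :: some x :: t
    | _ => some d :: r

def buildRev (r : List (Option Int)) : List Int → List (Option Int)
  | [] => r
  | d :: rest => buildRev (stepRev r d) rest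

-- contribution of the adjacent pair (a, b) in the (forward) run list
def pstep : Option (Option Int) → Option Int → Int
  | some (some a), some b => if a < 0 ∧ 0 < b then min (-a) b else 0
  | _, _ => 0

-- B's pair scan, recast as structural recursion over the forward run list
def pairBestF : List (Option Int) → Int
  | a :: b :: t => max (pstep (some a) b) (pairBestF (b :: t))
  | _ => 0

-- A's 'up' read off the reversed run list
def upR : List (Option Int) → Int
  | some p :: _ => if 0 < p then p else 0
  | _ => 0

-- A's 'down' read off the reversed run list: the run below the top one, if negative
def downAux : List (Option Int) → Int
  | some q :: _ => if q < 0 then q else 0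
  | _ => 0

def downR : List (Option Int) → Int
  | some p :: t => if p < 0 then p else downAux t
  | _ => 0

-- relation between A's previous diff and the reversed run list
def prevRel : Option Int → List (Option Int) → Prop
  | none, [] => True
  | some p, none :: _ => p = 0
  | some p, some q :: _ => (0 < p ∧ 0 < q) ∨ (p < 0 ∧ q < 0)
  | _, _ => False

lemma pstep_nonneg (u : Option (Option Int)) (v : Option Int) : 0 ≤ pstep u v := by
  unfold pstep
  rcases u with _ | (_ | a) <;> rcases v with _ | b <;> simp
  split_ifs with h
  · omega
  · omega

lemma pairBestF_nonneg (l : List (Option Int)) : 0 ≤ pairBestF l := by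
  induction l with
  | nil => simp [pairBestF]
  | cons a t ih =>
    cases t with
    | nil => simp [pairBestF]
    | cons b t' =>
      unfold pairBestF
      have := pstep_nonneg (some a) b
      omega

lemma pairBestF_append (xs : List (Option Int)) (v : Option Int) :
    pairBestF (xs ++ [v]) = max (pairBestF xs) (pstep xs.getLast? v) := by
  induction xs with
  | nil => simp [pairBestF, pstep]
  | cons a t ih =>
    cases t with
    | nil =>
      simp only [List.cons_append, List.nil_append, pairBestF, List.getLast?_singleton]
      omega
    | cons b t' =>
      simp only [List.cons_append, pairBestF, List.getLast?_cons_cons]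
      rw [show (b :: t') ++ [v] = b :: (t' ++ [v]) from rfl] at *
      rw [ih]
      omega

lemma pairBestF_push (r : List (Option Int)) (v : Option Int) :
    pairBestF ((v :: r).reverse) = max (pairBestF r.reverse) (pstep r.head? v) := by
  rw [List.reverse_cons, pairBestF_append, List.getLast?_reverse]

lemma pstep_none (u : Option (Option Int)) : pstep u none = 0 := by
  rcases u with _ | (_ | a) <;> rfl

lemma pstep_nonpos (u : Option (Option Int)) (b : Int) (hb : b ≤ 0) : pstep u (some b) = 0 := by
  rcases u with _ | (_ | a) <;> simp [pstep] <;> omega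

-- the main invariant lemma: A's machine equals B's pair-best of the built runs
lemma main_inv : ∀ (l : List Int) (r : List (Option Int)) (prev : Option Int),
    prevRel prev r →
    goA prev l (upR r) (downR r) (pairBestF r.reverse) = pairBestF (buildRev r l).reverse := by
  intro l
  induction l with
  | nil => intro r prev _; simp [goA, buildRev]
  | cons d rest ih =>
    intro r prev hrel
    show goA prev (d :: rest) (upR r) (downR r) (pairBestF r.reverse)
        = pairBestF (buildRev (stepRev r d) rest).reverse
    by_cases hd0 : d = 0
    · -- zero difference: boundary marker
      subst hd0
      rw [← ih (stepRev r 0) (some 0) (by simp [stepRev, prevRel])]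
      have h0 : stepRev r 0 = none :: r := by simp [stepRev]
      rw [h0, pairBestF_push, pstep_none, max_eq_left (pairBestF_nonneg r.reverse)]
      simp [goA, upR, downR]
    · rcases r with _ | ⟨_ | q, t⟩
      · -- r = []
        rcases prev with _ | p
        · have h0 : stepRev [] d = [some d] := by simp [stepRev, hd0]
          rw [← ih (stepRev [] d) (some d)
            (by simp only [h0, prevRel]; omega), h0]
          by_cases hdn : d < 0
          · simp [goA, hd0, hdn, upR, downR, pairBestF, show ¬ (0:Int) < d by omega]
          · have hdp : 0 < d := by omega
            have habs : min |0 + d| |(0:Int)| = 0 := by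
              rw [abs_of_pos (by omega)]; simp; omega
            simp [goA, hd0, hdn, upR, downR, downAux, pairBestF, habs, hdp]
        · simp [prevRel] at hrel
      · -- r = none :: t  (previous diff was 0)
        rcases prev with _ | p
        · simp [prevRel] at hrel
        · have hp0 : p = 0 := by simpa [prevRel] using hrel
          subst hp0
          have h0 : stepRev (none :: t) d = some d :: none :: t := by
            simp [stepRev, hd0]
          rw [← ih (stepRev (none :: t) d) (some d)
            (by simp only [h0, prevRel]; omega), h0]
          rw [pairBestF_push (none :: t) (some d)]
          have hps : pstep (none :: t : List (Option Int)).head? (some d) = 0 := by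
            simp [pstep]
          rw [hps, max_eq_left (pairBestF_nonneg (none :: t : List (Option Int)).reverse)]
          by_cases hdn : d < 0
          · simp [goA, hd0, hdn, upR, downR, show ¬ (0:Int) < d by omega]
          · have hdp : 0 < d := by omega
            have habs : min |0 + d| |(0:Int)| = 0 := by
              rw [abs_of_pos (by omega)]; simp; omega
            simp [goA, hd0, hdn, upR, downR, downAux, habs, hdp,
              max_eq_left (pairBestF_nonneg (t.reverse ++ [none]))]
      · -- r = some q :: t
        rcases prev with _ | p
        · simp [prevRel] at hrel
        · have hpq : (0 < p ∧ 0 < q) ∨ (p < 0 ∧ q < 0) := by simpa [prevRel] using hrel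
          rw [pairBestF_push t (some q)]
          rcases hpq with ⟨hp, hq⟩ | ⟨hp, hq⟩
          · -- previous run positive
            by_cases hdn : d < 0
            · -- new negative run after a positive one
              have h0 : stepRev (some q :: t) d = some d :: some q :: t := by
                simp [stepRev, hd0]; omega
              rw [← ih (stepRev (some q :: t) d) (some d)
                (by simp only [h0, prevRel]; omega), h0]
              rw [pairBestF_push (some q :: t) (some d), pairBestF_push t (some q)]
              have hps : pstep ((some q :: t : List (Option Int))).head? (some d) = 0 := by
                simp [pstep, show ¬ (q < 0 ∧ 0 < d) by omega]
              rw [hps, max_eq_left (le_max_of_le_left (pairBestF_nonneg t.reverse))]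
              simp only [goA, upR, downR]
              simp [hd0, hdn, show (0:Int) ≤ p by omega, hq,
                show ¬ (0:Int) < d by omega]
            · -- extend the positive run
              have hdp : 0 < d := by omega
              have h0 : stepRev (some q :: t) d = some (q + d) :: t := by
                simp [stepRev, hd0]; omega
              rw [← ih (stepRev (some q :: t) d) (some d)
                (by simp only [h0, prevRel]; omega), h0]
              rw [pairBestF_push t (some (q + d))]
              simp only [goA, upR, downR]
              simp only [if_neg hd0, if_neg hdn, if_pos hq,
                if_pos (show 0 < q + d by omega),
                if_neg (show ¬ q < 0 by omega), if_neg (show ¬ q + d < 0 by omega)]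
              rcases t with _ | ⟨_ | w, t'⟩
              · rw [show pstep (List.head? ([] : List (Option Int))) (some q) = 0 from rfl,
                  show pstep (List.head? ([] : List (Option Int))) (some (q + d)) = 0 from rfl]
                simp only [downAux]
                rw [abs_of_pos (show (0:Int) < q + d by omega)]
                congr 1
                simp [pairBestF]
              · rw [show pstep (List.head? (none :: t')) (some q) = 0 from rfl,
                  show pstep (List.head? (none :: t')) (some (q + d)) = 0 from rfl]
                simp only [downAux]
                rw [abs_of_pos (show (0:Int) < q + d by omega)]
                have := pairBestF_nonneg (none :: t' : List (Option Int)).reverse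
                congr 1
                simp
              · simp only [downAux]
                by_cases hw : w < 0
                · rw [if_pos hw,
                    show pstep (List.head? (some w :: t')) (some q) = if w < 0 ∧ 0 < q then min (-w) q else 0 from rfl,
                    show pstep (List.head? (some w :: t')) (some (q + d)) = if w < 0 ∧ 0 < q + d then min (-w) (q + d) else 0 from rfl,
                    if_pos (show w < 0 ∧ 0 < q from ⟨hw, hq⟩),
                    if_pos (show w < 0 ∧ 0 < q + d from ⟨hw, by omega⟩),
                    abs_of_pos (show (0:Int) < q + d by omega), abs_of_neg hw]
                  congr 1
                  omega
                · rw [if_neg hw,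
                    show pstep (List.head? (some w :: t')) (some q) = if w < 0 ∧ 0 < q then min (-w) q else 0 from rfl,
                    show pstep (List.head? (some w :: t')) (some (q + d)) = if w < 0 ∧ 0 < q + d then min (-w) (q + d) else 0 from rfl,
                    if_neg (show ¬ (w < 0 ∧ 0 < q) by omega),
                    if_neg (show ¬ (w < 0 ∧ 0 < q + d) by omega),
                    abs_of_pos (show (0:Int) < q + d by omega)]
                  congr 1
                  simp only [abs_zero]
                  omega
          · -- previous run negative
            by_cases hdn : d < 0
            · -- merge into the negative run
              have h0 : stepRev (some q :: t) d = some (q + d) :: t := by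
                simp [stepRev, hd0]; omega
              rw [← ih (stepRev (some q :: t) d) (some d)
                (by simp only [h0, prevRel]; omega), h0]
              rw [pairBestF_push t (some (q + d))]
              rw [pstep_nonpos _ q (by omega), pstep_nonpos _ (q + d) (by omega)]
              simp only [goA, upR, downR]
              simp [hd0, hdn, hq, show ¬ (0:Int) ≤ p by omega,
                show q + d < 0 by omega, show ¬ 0 < q by omega,
                show ¬ 0 < q + d by omega]
              
            · -- positive run after a negative run: a valley pair appears
              have hdp : 0 < d := by omega
              have h0 : stepRev (some q :: t) d = some d :: some q :: t := by
                simp [stepRev, hd0]; omega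
              rw [← ih (stepRev (some q :: t) d) (some d)
                (by simp only [h0, prevRel]; omega), h0]
              rw [pairBestF_push (some q :: t) (some d), pairBestF_push t (some q)]
              have hps : pstep ((some q :: t : List (Option Int))).head? (some d)
                  = min (-q) d := by simp [pstep]; omega
              rw [hps]
              simp only [goA, upR, downR]
              simp only [if_neg hd0, if_neg hdn, if_pos hq, if_pos hdp,
                if_neg (show ¬ 0 < q by omega), if_neg (show ¬ d < 0 from hdn),
                downAux, zero_add]
              rw [abs_of_pos hdp, abs_of_neg hq]
              congr 1
              omega

-- A's diff list and B's diffs list both equal zipWith (fun a b => b - a) heights heights.tail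
lemma diffA_eq (h : List Int) :
    (PySem.List.pyRange 1 (h.length : Int) 1).foldl
      (fun acc i => acc ++ [PySem.List.pyGetD h i 0 - PySem.List.pyGetD h (i - 1) 0]) []
    = List.zipWith (fun a b => b - a) h h.tail := by
  rw [PySem.List.foldl_append_singleton_eq_map, PySem.List.pyRange_one, List.map_map]
  apply List.ext_getElem
  · simp [List.length_tail]
  · intro i h1 h2
    simp only [List.nil_append, List.getElem_map, List.getElem_range, Function.comp_apply,
      List.getElem_zipWith, List.getElem_tail]
    have hlen : i + 1 < h.length := by
      simp at h1; omega
    have e1 : (1 : Int) + (i : Int) = ((i + 1 : Nat) : Int) := by push_cast; ring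
    have e2 : (1 : Int) + (i : Int) - 1 = ((i : Nat) : Int) := by push_cast; ring
    rw [e2, e1, PySem.List.pyGetD_natCast, PySem.List.pyGetD_natCast,
      List.getD_eq_getElem h 0 hlen, List.getD_eq_getElem h 0 (by omega)]

lemma diffB_eq (h : List Int) :
    (h.zip (PySem.List.slice h (some 1) none)).map (fun p => p.2 - p.1)
    = List.zipWith (fun a b => b - a) h h.tail := by
  rw [PySem.List.slice_from_one]
  simp [List.zip, List.map_zipWith]

-- the lookback test 'i > 0 and diff[i-1] >= 0' at i = pre.length, expressed via pre's last element
lemma down_guard (pre suf : List Int) (down : Int) :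
    (if (0:Int) < (pre.length : Int) ∧ 0 ≤ PySem.List.pyGetD (pre ++ suf) ((pre.length : Int) - 1) 0 then (0:Int) else down)
    = (if (match pre.getLast? with | some p => decide (0 ≤ p) | none => false) then (0:Int) else down) := by
  rcases List.eq_nil_or_concat pre with rfl | ⟨l, a, rfl⟩
  · simp
  · simp only [List.concat_eq_append]
    have e : (((l ++ [a]).length : Int) - 1) = ((l.length : Nat) : Int) := by
      simp only [List.length_append, List.length_cons, List.length_nil]
      push_cast; ring
    have hget : PySem.List.pyGetD ((l ++ [a]) ++ suf) (((l ++ [a]).length : Int) - 1) 0 = a := by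
      rw [e, PySem.List.pyGetD_natCast, List.append_assoc,
        List.getD_eq_getElem _ 0 (by simp)]
      simp [List.getElem_append_right]
    rw [hget]
    simp only [List.getLast?_concat]
    split_ifs with h1 h2 h2 <;> simp_all <;> omega

-- A's enumerate-fold equals goA
lemma foldA : ∀ (suf pre : List Int) (up down md : Int),
    (List.foldl (stepA (pre ++ suf)) (up, down, md) (PySem.List.enumerate suf (pre.length : Int))).2.2
      = goA pre.getLast? suf up down md := by
  intro suf
  induction suf with
  | nil => intro pre up down md; simp [PySem.List.enumerate_nil, goA]
  | cons d rest ih =>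
    intro pre up down md
    rw [PySem.List.enumerate_cons, List.foldl_cons]
    have key := ih (pre ++ [d])
      (stepA (pre ++ d :: rest) (up, down, md) ((pre.length : Int), d)).1
      (stepA (pre ++ d :: rest) (up, down, md) ((pre.length : Int), d)).2.1
      (stepA (pre ++ d :: rest) (up, down, md) ((pre.length : Int), d)).2.2
    rw [show (pre ++ [d]) ++ rest = pre ++ d :: rest by simp] at key
    rw [show ((pre ++ [d]).length : Int) = (pre.length : Int) + 1 by
      simp only [List.length_append, List.length_cons, List.length_nil]; push_cast; ring] at key
    rw [List.getLast?_concat] at key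
    rw [key]
    by_cases hd0 : d = 0
    · simp [stepA, goA, hd0]
    · by_cases hdneg : d < 0
      · simp only [stepA, goA, hd0, hdneg, if_true, if_false, ite_false, ite_true]
        rw [down_guard pre (d :: rest) down]
      · simp [stepA, goA, hd0, hdneg]

-- B's build fold equals buildRev on the reversed accumulator
lemma stepB_rev (racc : List (Option Int)) (d : Int) :
    (stepB racc d).reverse = stepRev racc.reverse d := by
  rw [show racc = racc.reverse.reverse from (List.reverse_reverse racc).symm]
  generalize racc.reverse = rr
  unfold stepB stepRev
  by_cases hd : d = 0
  · simp [hd]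
  · simp only [hd, if_false, List.reverse_reverse, List.getLast?_reverse]
    cases rr with
    | nil => simp
    | cons x t =>
      cases x with
      | none => simp
      | some v =>
        simp only [List.head?_cons]
        by_cases hs : (decide (v < 0)) = (decide (d < 0)) <;>
          simp [hs, List.reverse_cons]

lemma buildFold : ∀ (l : List Int) (racc : List (Option Int)),
    List.foldl stepB racc l = (buildRev racc.reverse l).reverse := by
  intro l
  induction l with
  | nil => intro racc; simp [buildRev]
  | cons d rest ih =>
    intro racc
    rw [List.foldl_cons, ih (stepB racc d), stepB_rev]
    rfl

-- B's pair-scan fold equals pairBestF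
lemma pairStepB_nonneg (acc : Int) (p : Option Int × Option Int) (h : 0 ≤ acc) :
    0 ≤ pairStepB acc p := by
  rcases p with ⟨_ | a, _ | b⟩ <;> simp [pairStepB] <;>
    first | omega | (split_ifs <;> omega)

lemma pairFold : ∀ (runs : List (Option Int)) (acc : Int), 0 ≤ acc →
    List.foldl pairStepB acc (runs.zip runs.tail) = max acc (pairBestF runs) := by
  intro runs
  induction runs with
  | nil => intro acc h; simp [pairBestF]; omega
  | cons a t ih =>
    intro acc h
    cases t with
    | nil => simp [pairBestF]; omega
    | cons b t' =>
      have hP := pairBestF_nonneg (b :: t')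
      simp only [List.tail_cons, List.zip_cons_cons, List.foldl_cons]
      simp only [List.tail_cons] at ih
      rw [ih _ (pairStepB_nonneg acc (a, b) h)]
      show max (pairStepB acc (a, b)) (pairBestF (b :: t')) = max acc (pairBestF (a :: b :: t'))
      rcases a with _ | a' <;> rcases b with _ | b' <;>
        simp only [pairBestF, pairStepB, pstep] <;>
        first | omega | (split_ifs <;> omega)

-- ===== VERDICT (by name: the statement is the Claim_ definition above) =====
theorem do_logic_spec : Claim_equal_do_logic := by
  intro heights _
  unfold Spec_do_logic do_logic do_logic_alt
  rw [diffA_eq, diffB_eq]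
  set D := List.zipWith (fun a b => b - a) heights heights.tail with hD
  have hA : ((PySem.List.enumerate D 0).foldl (stepA D) (0, 0, 0)).2.2 = goA none D 0 0 0 := by
    have := foldA D [] 0 0 0
    simpa using this
  have hB : List.foldl stepB [] D = (buildRev [] D).reverse := by
    simpa using buildFold D []
  rw [hA]
  simp only [hB, PySem.List.slice_from_one]
  rw [pairFold _ 0 le_rfl]
  have := main_inv D [] none trivial
  simp only [upR, downR, pairBestF, List.reverse_nil] at this
  rw [this]
  have := pairBestF_nonneg (buildRev [] D).reverse
  omega
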